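-- pv_equiv track=rewrite | github.com/Fur4nk/epaper-ha-dashboard | ha_epaper_dashboard.py | _portrait_rect_to_epd_rect
-- ===== SOURCE A (Python) =====
-- def _portrait_rect_to_epd_rect(rect, portrait_w: int, portrait_h: int):
--     x0, y0, x1, y1 = rect
--     x0 = max(0, min(portrait_w - 1, int(x0)))
--     y0 = max(0, min(portrait_h - 1, int(y0)))
--     x1 = max(x0 + 1, min(portrait_w, int(x1)))
--     y1 = max(y0 + 1, min(portrait_h, int(y1)))
--
--     def _map_point(px: int, py: int):
--         # Image is rotated 90 degrees CCW before sending to the panel.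
--         return py, (portrait_w - 1) - px
--
--     corners = [
--         _map_point(x0, y0),
--         _map_point(x1 - 1, y0),
--         _map_point(x0, y1 - 1),
--         _map_point(x1 - 1, y1 - 1),
--     ]
--     xs = [c[0] for c in corners]
--     ys = [c[1] for c in corners]
--     return min(xs), min(ys), max(xs) + 1, max(ys) + 1
-- ===== SOURCE B (Python) =====
-- def _portrait_rect_to_epd_rect(rect, portrait_w: int, portrait_h: int):
--     x0, y0, x1, y1 = rect
--     x0 = max(0, min(portrait_w - 1, int(x0)))
--     y0 = max(0, min(portrait_h - 1, int(y0)))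
--     x1 = max(x0 + 1, min(portrait_w, int(x1)))
--     y1 = max(y0 + 1, min(portrait_h, int(y1)))
--     # Rotation (px, py) -> (py, (portrait_w - 1) - px) is monotone in py and
--     # antitone in px, so the min/max over the four corners collapses to a
--     # closed form: no corner list, no scan.
--     return y0, portrait_w - x1, y1, portrait_w - x0
-- ===== Notes on version B (the rewrite author's own statement) =====
-- stated objective: simpler
-- what changed: B drops the _map_point helper, the 4-corner list and the xs/ys min/max scans, returning the analytically reduced closed form (y0, portrait_w - x1, y1, portrait_w - x0) after the same clamping.
import Mathlib
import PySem

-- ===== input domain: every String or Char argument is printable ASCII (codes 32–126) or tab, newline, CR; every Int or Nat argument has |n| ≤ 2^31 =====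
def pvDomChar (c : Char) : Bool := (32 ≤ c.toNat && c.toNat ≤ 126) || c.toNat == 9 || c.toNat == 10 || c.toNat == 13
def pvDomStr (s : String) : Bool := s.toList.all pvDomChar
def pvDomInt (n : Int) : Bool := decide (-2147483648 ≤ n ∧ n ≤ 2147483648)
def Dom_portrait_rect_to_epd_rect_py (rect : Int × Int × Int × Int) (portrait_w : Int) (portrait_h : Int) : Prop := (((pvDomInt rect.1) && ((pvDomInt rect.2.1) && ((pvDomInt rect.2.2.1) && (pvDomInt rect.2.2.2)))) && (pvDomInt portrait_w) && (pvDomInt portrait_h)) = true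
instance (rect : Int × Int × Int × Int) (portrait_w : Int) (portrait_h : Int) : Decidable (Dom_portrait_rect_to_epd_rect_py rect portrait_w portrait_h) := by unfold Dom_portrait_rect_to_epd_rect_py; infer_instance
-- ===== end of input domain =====

-- B replaces A's rotated-corner list and min/max scans by the analytically
-- reduced closed form after the same clamping (objective: simpler).

-- ===== PORT A =====
def portrait_rect_to_epd_rect_py (rect : Int × Int × Int × Int) (portrait_w : Int) (portrait_h : Int) : Int × Int × Int × Int :=
  let x0 := max 0 (min (portrait_w - 1) rect.1)
  let y0 := max 0 (min (portrait_h - 1) rect.2.1)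
  let x1 := max (x0 + 1) (min portrait_w rect.2.2.1)
  let y1 := max (y0 + 1) (min portrait_h rect.2.2.2)
  let map_point : Int → Int → Int × Int := fun px py => (py, (portrait_w - 1) - px)
  let corners : List (Int × Int) :=
    [map_point x0 y0, map_point (x1 - 1) y0, map_point x0 (y1 - 1), map_point (x1 - 1) (y1 - 1)]
  let xs := corners.map (fun c => c.1)
  let ys := corners.map (fun c => c.2)
  ((PySem.List.min? xs (fun v => v)).getD 0,
   (PySem.List.min? ys (fun v => v)).getD 0,
   (PySem.List.max? xs (fun v => v)).getD 0 + 1,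
   (PySem.List.max? ys (fun v => v)).getD 0 + 1)

-- ===== PORT B =====
def portrait_rect_to_epd_rect_py_alt (rect : Int × Int × Int × Int) (portrait_w : Int) (portrait_h : Int) : Int × Int × Int × Int :=
  let x0 := max 0 (min (portrait_w - 1) rect.1)
  let y0 := max 0 (min (portrait_h - 1) rect.2.1)
  let x1 := max (x0 + 1) (min portrait_w rect.2.2.1)
  let y1 := max (y0 + 1) (min portrait_h rect.2.2.2)
  (y0, portrait_w - x1, y1, portrait_w - x0)

-- ===== PRECONDITION & SPEC =====
def Spec_portrait_rect_to_epd_rect_py (rect : Int × Int × Int × Int) (portrait_w : Int) (portrait_h : Int) (out : Int × Int × Int × Int) : Prop := out = portrait_rect_to_epd_rect_py_alt rect portrait_w portrait_h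
instance (rect : Int × Int × Int × Int) (portrait_w : Int) (portrait_h : Int) (out : Int × Int × Int × Int) : Decidable (Spec_portrait_rect_to_epd_rect_py rect portrait_w portrait_h out) := by unfold Spec_portrait_rect_to_epd_rect_py; infer_instance

-- ===== CLAIM (what is proved, stated in full; the proofs are below) =====
def Claim_equal_portrait_rect_to_epd_rect_py : Prop := ∀ (rect : Int × Int × Int × Int) (portrait_w : Int) (portrait_h : Int), Dom_portrait_rect_to_epd_rect_py rect portrait_w portrait_h → Spec_portrait_rect_to_epd_rect_py rect portrait_w portrait_h (portrait_rect_to_epd_rect_py rect portrait_w portrait_h)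

-- ===== LEMMAS AND PROOFS =====

-- ===== VERDICT (by name: the statement is the Claim_ definition above) =====
theorem portrait_rect_to_epd_rect_py_spec : Claim_equal_portrait_rect_to_epd_rect_py := by
  intro rect portrait_w portrait_h _
  unfold Spec_portrait_rect_to_epd_rect_py
  unfold portrait_rect_to_epd_rect_py portrait_rect_to_epd_rect_py_alt
  simp only [List.map, PySem.List.min?_id_cons, PySem.List.max?_id_cons, List.foldl,
    Option.getD_some]
  refine Prod.ext ?_ (Prod.ext ?_ (Prod.ext ?_ ?_)) <;> simp <;> omega
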